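-- pv_equiv track=rewrite | github.com/kokilk/city_scrapper | execution/pluto_lookup.py | _normalize_street_for_pluto
-- ===== SOURCE A (Python) =====
-- def _normalize_street_for_pluto(delivery_line: str) -> str:
--     """Extract just the street name portion, strip unit info."""
--     parts = delivery_line.strip().upper().split()
--     if parts and (parts[0].isdigit() or (len(parts[0]) > 1 and parts[0][:-1].isdigit())):
--         parts = parts[1:]
--     # Strip unit suffixes
--     for suffix in ["STE", "APT", "UNIT", "FL", "FLOOR", "#"]:
--         if suffix in parts:
--             idx = parts.index(suffix)
--             parts = parts[:idx]
--     return " ".join(parts)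
-- ===== SOURCE B (Python) =====
-- def _normalize_street_for_pluto(delivery_line: str) -> str:
--     """Extract just the street name portion, strip unit info."""
--     parts = delivery_line.strip().upper().split()
--     if parts and (parts[0].isdigit() or (len(parts[0]) > 1 and parts[0][:-1].isdigit())):
--         parts = parts[1:]
--     suffixes = {"STE", "APT", "UNIT", "FL", "FLOOR", "#"}
--     kept = []
--     for token in parts:
--         if token in suffixes:
--             break
--         kept.append(token)
--     return " ".join(kept)
-- ===== Notes on version B (the rewrite author's own statement) =====
-- stated objective: simpler
-- what changed: Replaces A's loop over the six suffixes with repeated .index lookups and re-slicing of the token list by a single left-to-right pass over the tokens that stops at the first token belonging to the suffix set.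
import Mathlib
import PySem

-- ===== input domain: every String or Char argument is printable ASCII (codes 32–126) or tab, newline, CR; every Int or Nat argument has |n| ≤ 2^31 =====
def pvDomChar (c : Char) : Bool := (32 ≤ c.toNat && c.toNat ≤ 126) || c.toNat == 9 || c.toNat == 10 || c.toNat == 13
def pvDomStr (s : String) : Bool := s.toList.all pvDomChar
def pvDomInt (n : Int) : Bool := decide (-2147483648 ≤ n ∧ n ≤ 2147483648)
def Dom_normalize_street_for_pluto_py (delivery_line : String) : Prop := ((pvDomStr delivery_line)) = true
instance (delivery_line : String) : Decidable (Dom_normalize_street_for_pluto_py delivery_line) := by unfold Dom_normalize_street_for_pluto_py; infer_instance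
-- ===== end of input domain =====

-- B replaces A's loop over the six suffixes (with .index and re-slicing) by one
-- left-to-right pass over the tokens that stops at the first suffix token (objective: simpler).

-- ===== PORT A =====

-- leading-number guard shared by both Pythons: drop the first token if it is all
-- digits, or longer than 1 with all but the last char digits
def pvLeadNum (parts : List String) : List String :=
  match parts with
  | [] => parts
  | p0 :: rest =>
    if PySem.Str.strIsdigit p0 ∨
        (1 < PySem.Str.len p0 ∧ PySem.Str.strIsdigit (PySem.Str.slice p0 none (some (-1)))) then
      rest
    else parts

-- A's loop body: 'if suffix in parts: parts = parts[:parts.index(suffix)]'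
def pvCut (ps : List String) (s : String) : List String :=
  if s ∈ ps then
    match PySem.List.index? ps s with
    | some idx => PySem.List.slice ps none (some (idx : Int))
    | none => ps
  else ps

def normalize_street_for_pluto_py (delivery_line : String) : String :=
  let parts := PySem.Str.split₀ (PySem.Str.upper (PySem.Str.strip delivery_line))
  let parts := pvLeadNum parts
  let parts := ["STE", "APT", "UNIT", "FL", "FLOOR", "#"].foldl pvCut parts
  PySem.Str.join " " parts

-- ===== PORT B =====

-- B's for-loop with break: keep tokens until one is in the suffix set
def pvKeep (sufs : List String) : List String → List String
  | [] => []
  | t :: rest => if t ∈ sufs then [] else t :: pvKeep sufs rest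

def normalize_street_for_pluto_py_alt (delivery_line : String) : String :=
  let parts := PySem.Str.split₀ (PySem.Str.upper (PySem.Str.strip delivery_line))
  let parts := pvLeadNum parts
  let suffixes := PySem.Set.ofList ["STE", "APT", "UNIT", "FL", "FLOOR", "#"]
  PySem.Str.join " " (pvKeep suffixes parts)

-- ===== PRECONDITION & SPEC =====
def Spec_normalize_street_for_pluto_py (delivery_line : String) (out : String) : Prop := out = normalize_street_for_pluto_py_alt delivery_line
instance (delivery_line : String) (out : String) : Decidable (Spec_normalize_street_for_pluto_py delivery_line out) := by unfold Spec_normalize_street_for_pluto_py; infer_instance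

-- ===== CLAIM (what is proved, stated in full; the proofs are below) =====
def Claim_equal_normalize_street_for_pluto_py : Prop := ∀ (delivery_line : String), Dom_normalize_street_for_pluto_py delivery_line → Spec_normalize_street_for_pluto_py delivery_line (normalize_street_for_pluto_py delivery_line)

-- ===== LEMMAS AND PROOFS =====

-- one truncation step of A cuts exactly before the first occurrence of s
theorem pvCut_eq_takeWhile (l : List String) (s : String) :
    pvCut l s = l.takeWhile (fun t => !(t == s)) := by
  induction l with
  | nil => simp [pvCut]
  | cons x xs ih =>
    simp only [pvCut, PySem.List.index?_eq_idxOf?] at ih ⊢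
    rw [List.idxOf?_cons]
    by_cases hx : x = s
    · subst hx
      simp only [BEq.rfl, if_pos trivial]
      rw [if_pos List.mem_cons_self, PySem.List.slice_to_natCast]
      simp
    · have hbe : (x == s) = false := by simp [hx]
      rw [hbe]
      cases h : List.idxOf? s xs with
      | none =>
        have hm : s ∉ xs := List.idxOf?_eq_none_iff.mp h
        have hns : s ∉ x :: xs := by simp [hm, Ne.symm hx]
        rw [h] at ih
        rw [if_neg hm] at ih
        rw [if_neg hns, List.takeWhile_cons, hbe]
        simpa using ih
      | some i =>
        have hm : s ∈ xs := by
          have := List.isSome_idxOf? (l := xs) (a := s)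
          simp [h] at this; exact this
        rw [h, if_pos hm] at ih
        simp only [PySem.List.slice_to_natCast] at ih
        have h1 : s ∈ x :: xs := List.mem_cons_of_mem _ hm
        simp only [if_pos h1, Option.map_some, Bool.false_eq_true, if_false,
          PySem.List.slice_to_natCast, List.take_succ_cons, List.takeWhile_cons, hbe]
        simp [ih]

theorem pvKeep_eq_takeWhile (sufs : List String) (l : List String) :
    pvKeep sufs l = l.takeWhile (fun t => decide (t ∉ sufs)) := by
  induction l with
  | nil => rfl
  | cons x xs ih =>
    by_cases h : x ∈ sufs <;> simp [pvKeep, h, ih]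

-- folding A's cut over the suffix list = one takeWhile over membership in the list
theorem pvFoldl_cut_eq (S : List String) (l : List String) :
    S.foldl pvCut l = l.takeWhile (fun t => decide (t ∉ S)) := by
  induction S generalizing l with
  | nil => exact (List.takeWhile_eq_self_iff.mpr (by simp)).symm
  | cons s S ih =>
    rw [List.foldl_cons, ih, pvCut_eq_takeWhile, List.takeWhile_takeWhile]
    congr 1
    funext t
    by_cases h1 : t ∈ S <;> by_cases h2 : t = s <;> simp [h1, h2]

-- ===== VERDICT =====
theorem normalize_street_for_pluto_py_spec : Claim_equal_normalize_street_for_pluto_py := by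
  intro s _
  show normalize_street_for_pluto_py s = normalize_street_for_pluto_py_alt s
  unfold normalize_street_for_pluto_py normalize_street_for_pluto_py_alt
  have hset : PySem.Set.ofList ["STE", "APT", "UNIT", "FL", "FLOOR", "#"]
      = ["STE", "APT", "UNIT", "FL", "FLOOR", "#"] := by decide
  simp only [hset, pvFoldl_cut_eq, pvKeep_eq_takeWhile]
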